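-- pv_equiv track=rewrite | github.com/mhserry/Tests | src/TextSummarizing.py | __gen_sentence_score_and_wrd_cnt_tables
-- ===== SOURCE A (Python) =====
-- def __gen_sentence_score_and_wrd_cnt_tables(sentences, word_freq_table):
--     sentence_scores = dict()
--     sentence_wrd_cnt_table = dict()
--     for sentence in sentences:
--         wrd_cnt_except_stp_words = 0
--         for wrd, freq in word_freq_table.items():
--             if wrd in sentence.lower():
--                 wrd_cnt_except_stp_words += 1
--                 sentence_wrd_cnt_table[sentence] = wrd_cnt_except_stp_words
--
--                 if sentence in sentence_scores:
--                     sentence_scores[sentence] += freq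
--                 else:
--                     sentence_scores[sentence] = freq
--
--         if sentence in sentence_scores:
--             sentence_scores[sentence] = sentence_scores[sentence]
--
--     return sentence_scores, sentence_wrd_cnt_table
-- ===== SOURCE B (Python) =====
-- def __gen_sentence_score_and_wrd_cnt_tables(sentences, word_freq_table):
--     # Lower each distinct sentence once and scan the table once per distinct
--     # sentence (memoised), instead of re-lowering the sentence for every word.
--     per_sentence = {}  # sentence -> (sum of matched freqs, number of matched words)
--     sentence_scores = {}
--     sentence_wrd_cnt_table = {}
--     for sentence in sentences:
--         if sentence not in per_sentence:
--             low = sentence.lower()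
--             matched = [freq for wrd, freq in word_freq_table.items() if wrd in low]
--             per_sentence[sentence] = (sum(matched), len(matched))
--         score, cnt = per_sentence[sentence]
--         if cnt:
--             sentence_scores[sentence] = sentence_scores.get(sentence, 0) + score
--             sentence_wrd_cnt_table[sentence] = cnt
--     return sentence_scores, sentence_wrd_cnt_table
-- ===== Notes on version B (the rewrite author's own statement) =====
-- stated objective: alternative
-- what changed: B lowers each distinct sentence once and scans the frequency table once per distinct sentence (memoised in a dict, collecting matched frequencies with one comprehension and summing), instead of A's inner loop that re-lowers the sentence for every word of every occurrence and updates both output dicts match by match.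
import Mathlib
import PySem

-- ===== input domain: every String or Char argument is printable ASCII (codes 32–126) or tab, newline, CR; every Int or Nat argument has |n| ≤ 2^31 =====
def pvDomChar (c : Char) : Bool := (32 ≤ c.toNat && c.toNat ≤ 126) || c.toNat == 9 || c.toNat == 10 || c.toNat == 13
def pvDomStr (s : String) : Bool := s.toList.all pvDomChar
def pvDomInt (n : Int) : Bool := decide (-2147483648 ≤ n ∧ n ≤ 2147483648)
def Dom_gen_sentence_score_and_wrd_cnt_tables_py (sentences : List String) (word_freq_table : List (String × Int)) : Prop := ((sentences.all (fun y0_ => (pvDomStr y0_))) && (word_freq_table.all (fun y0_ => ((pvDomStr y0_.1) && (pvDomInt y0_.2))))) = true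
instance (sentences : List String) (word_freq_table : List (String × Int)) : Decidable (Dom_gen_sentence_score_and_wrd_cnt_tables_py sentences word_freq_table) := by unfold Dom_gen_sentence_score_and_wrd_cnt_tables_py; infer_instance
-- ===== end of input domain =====

-- B lowers each distinct sentence once and scans the word table once per distinct sentence
-- (memoised), instead of A's per-word re-lowering and match-by-match dict updates; objective: alternative.
-- The dict argument is modelled as its association list; both ports read it through PySem.Dict.ofList.

-- ===== PORT A =====
-- inner loop body of A: state (wrd_cnt_except_stp_words, sentence_wrd_cnt_table, sentence_scores)
def pvStepA (sentence : String)
    (q : Int × PySem.Dict String Int × PySem.Dict String Int) (wf : String × Int) :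
    Int × PySem.Dict String Int × PySem.Dict String Int :=
  if PySem.Str.isIn wf.1 (PySem.Str.lower sentence) then
    let cnt := q.1 + 1
    let counts := q.2.1.insert sentence cnt
    let scores :=
      if q.2.2.contains sentence then q.2.2.insert sentence (q.2.2.getD sentence 0 + wf.2)
      else q.2.2.insert sentence wf.2
    (cnt, counts, scores)
  else q

def gen_sentence_score_and_wrd_cnt_tables_py (sentences : List String) (word_freq_table : List (String × Int)) : (List (String × Int)) × (List (String × Int)) :=
  let wft := (PySem.Dict.ofList word_freq_table).items
  let st := sentences.foldl
    (fun (p : PySem.Dict String Int × PySem.Dict String Int) sentence =>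
      let r := wft.foldl (pvStepA sentence) (0, p.2, p.1)
      let scores := r.2.2
      -- if sentence in sentence_scores: sentence_scores[sentence] = sentence_scores[sentence]
      let scores := if scores.contains sentence then scores.insert sentence (scores.getD sentence 0) else scores
      (scores, r.2.1))
    (PySem.Dict.empty, PySem.Dict.empty)
  (st.1.items, st.2.items)

-- ===== PORT B =====
-- B's loop body: state (per_sentence, sentence_scores, sentence_wrd_cnt_table)
def pvStepB (wft : List (String × Int))
    (st : PySem.Dict String (Int × Int) × PySem.Dict String Int × PySem.Dict String Int)
    (sentence : String) :
    PySem.Dict String (Int × Int) × PySem.Dict String Int × PySem.Dict String Int :=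
  let per :=
    if st.1.contains sentence then st.1
    else
      let low := PySem.Str.lower sentence
      let matched := (wft.filter (fun wf => PySem.Str.isIn wf.1 low)).map (·.2)
      st.1.insert sentence (matched.sum, (matched.length : Int))
  let sc := per.getD sentence (0, 0)
  if sc.2 ≠ 0 then
    (per, st.2.1.insert sentence (st.2.1.getD sentence 0 + sc.1), st.2.2.insert sentence sc.2)
  else (per, st.2.1, st.2.2)

def gen_sentence_score_and_wrd_cnt_tables_py_alt (sentences : List String) (word_freq_table : List (String × Int)) : (List (String × Int)) × (List (String × Int)) :=
  let wft := (PySem.Dict.ofList word_freq_table).items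
  let st := sentences.foldl (pvStepB wft) (PySem.Dict.empty, PySem.Dict.empty, PySem.Dict.empty)
  (st.2.1.items, st.2.2.items)

-- ===== PRECONDITION & SPEC =====
def Spec_gen_sentence_score_and_wrd_cnt_tables_py (sentences : List String) (word_freq_table : List (String × Int)) (out : (List (String × Int)) × (List (String × Int))) : Prop := out = gen_sentence_score_and_wrd_cnt_tables_py_alt sentences word_freq_table
instance (sentences : List String) (word_freq_table : List (String × Int)) (out : (List (String × Int)) × (List (String × Int))) : Decidable (Spec_gen_sentence_score_and_wrd_cnt_tables_py sentences word_freq_table out) := by unfold Spec_gen_sentence_score_and_wrd_cnt_tables_py; infer_instance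

-- ===== CLAIM (what is proved, stated in full; the proofs are below) =====
def Claim_equal_gen_sentence_score_and_wrd_cnt_tables_py : Prop := ∀ (sentences : List String) (word_freq_table : List (String × Int)), Dom_gen_sentence_score_and_wrd_cnt_tables_py sentences word_freq_table → Spec_gen_sentence_score_and_wrd_cnt_tables_py sentences word_freq_table (gen_sentence_score_and_wrd_cnt_tables_py sentences word_freq_table)

-- ===== LEMMAS AND PROOFS =====

-- matched frequencies of a sentence against a word list
def pvM (wft : List (String × Int)) (s : String) : List Int :=
  (wft.filter (fun wf => PySem.Str.isIn wf.1 (PySem.Str.lower s))).map (·.2)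

theorem pvInnerA (wft : List (String × Int)) (s : String)
    (n : Int) (counts scores : PySem.Dict String Int) :
    wft.foldl (pvStepA s) (n, counts, scores) =
      (n + ((pvM wft s).length : Int),
       if pvM wft s = [] then counts else counts.insert s (n + ((pvM wft s).length : Int)),
       if pvM wft s = [] then scores else scores.insert s (scores.getD s 0 + (pvM wft s).sum)) := by
  induction wft generalizing n counts scores with
  | nil => simp [pvM]
  | cons wf rest ih =>
    by_cases h : PySem.Str.isIn wf.1 (PySem.Str.lower s) = true
    · have hs : (if scores.contains s then scores.insert s (scores.getD s 0 + wf.2)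
          else scores.insert s wf.2) = scores.insert s (scores.getD s 0 + wf.2) := by
        by_cases hc : scores.contains s = true
        · simp [hc]
        · simp only [Bool.not_eq_true] at hc
          rw [if_neg (by simp [hc]), PySem.Dict.getD_of_not_contains _ _ hc, zero_add]
      have step : pvStepA s (n, counts, scores) wf
          = (n + 1, counts.insert s (n + 1), scores.insert s (scores.getD s 0 + wf.2)) := by
        simp only [pvStepA, h, if_true]
        rw [hs]
      have hM : pvM (wf :: rest) s = wf.2 :: pvM rest s := by
        simp only [pvM, List.filter_cons, h, if_true, List.map_cons]
      rw [List.foldl_cons, step, ih, hM]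
      by_cases hr : pvM rest s = []
      · simp [hr]
      · simp only [if_neg hr, if_neg (by simp : ¬(wf.2 :: pvM rest s = []))]
        simp only [Prod.mk.injEq, List.length_cons]
        refine ⟨by push_cast; ring, ?_, ?_⟩
        · rw [PySem.Dict.insert_insert_self]
          exact congrArg _ (by push_cast; ring)
        · rw [PySem.Dict.getD_insert_self, PySem.Dict.insert_insert_self]
          exact congrArg _ (by rw [List.sum_cons]; ring)
    · simp only [Bool.not_eq_true] at h
      have hM : pvM (wf :: rest) s = pvM rest s := by
        simp only [pvM, List.filter_cons, h, Bool.false_eq_true, if_false]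
      simp only [List.foldl_cons, pvStepA, h, Bool.false_eq_true, if_false, ih, hM]

-- A's outer step, under the invariant that every key of scores has a nonempty match list
theorem pvOuterA (wft : List (String × Int)) (s : String)
    (counts scores : PySem.Dict String Int)
    (hinv : scores.contains s = true → pvM wft s ≠ []) :
    (let r := wft.foldl (pvStepA s) (0, counts, scores)
     let scores' := r.2.2
     let scores' := if scores'.contains s then scores'.insert s (scores'.getD s 0) else scores'
     ((scores' : PySem.Dict String Int), r.2.1)) =
      (if pvM wft s = [] then scores else scores.insert s (scores.getD s 0 + (pvM wft s).sum),
       if pvM wft s = [] then counts else counts.insert s ((pvM wft s).length : Int)) := by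
  rw [pvInnerA]
  by_cases hM : pvM wft s = []
  · have hc : scores.contains s = false := by
      by_cases h : scores.contains s = true
      · exact absurd hM (hinv h)
      · simpa using h
    simp [hM, hc]
  · have hc : (scores.insert s (scores.getD s 0 + (pvM wft s).sum)).contains s = true :=
      PySem.Dict.contains_insert_self _ _ _
    simp [hM, hc, PySem.Dict.getD_insert_self, PySem.Dict.insert_insert_self]

-- invariant on B's memo dict
def pvPerInv (wft : List (String × Int)) (per : PySem.Dict String (Int × Int)) : Prop :=
  ∀ s v, per.get? s = some v → v = ((pvM wft s).sum, ((pvM wft s).length : Int))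

-- B's step, under the memo invariant
theorem pvOuterB (wft : List (String × Int)) (s : String)
    (per : PySem.Dict String (Int × Int)) (scores counts : PySem.Dict String Int)
    (hper : pvPerInv wft per) :
    (pvStepB wft (per, scores, counts) s).2 =
      (if pvM wft s = [] then scores else scores.insert s (scores.getD s 0 + (pvM wft s).sum),
       if pvM wft s = [] then counts else counts.insert s ((pvM wft s).length : Int)) ∧
    pvPerInv wft (pvStepB wft (per, scores, counts) s).1 := by
  have hmatched : ((wft.filter (fun wf => PySem.Str.isIn wf.1 (PySem.Str.lower s))).map (·.2)) = pvM wft s := rfl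
  -- the memo value looked up is exactly (sum, length) of pvM wft s
  have hper' : ∀ per', per' = (if per.contains s then per
        else per.insert s ((pvM wft s).sum, ((pvM wft s).length : Int))) →
      per'.getD s (0, 0) = ((pvM wft s).sum, ((pvM wft s).length : Int)) ∧ pvPerInv wft per' := by
    intro per' hdef
    by_cases hc : per.contains s = true
    · subst hdef; simp only [hc, if_true]
      constructor
      · have h : (per.get? s).isSome = true := by
          rw [← PySem.Dict.contains_eq_isSome_get?]; exact hc
        rcases Option.isSome_iff_exists.mp h with ⟨v, hv⟩
        rw [PySem.Dict.getD_eq_get?_getD, hv, Option.getD_some, hper s v hv]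
      · exact hper
    · simp only [Bool.not_eq_true] at hc
      subst hdef; simp only [hc, Bool.false_eq_true, if_false]
      refine ⟨PySem.Dict.getD_insert_self _ _ _ _, ?_⟩
      intro t v hv
      by_cases hts : t = s
      · subst hts; rw [PySem.Dict.get?_insert_self] at hv; exact (Option.some_inj.mp hv).symm
      · rw [PySem.Dict.get?_insert_of_ne _ _ hts] at hv; exact hper t v hv
  obtain ⟨hget, hinv'⟩ := hper' _ rfl
  have h1 : (pvStepB wft (per, scores, counts) s).1 =
      (if per.contains s then per
       else per.insert s ((pvM wft s).sum, ((pvM wft s).length : Int))) := by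
    simp only [pvStepB, hmatched]
    split <;> split <;> rfl
  refine ⟨?_, h1 ▸ hinv'⟩
  simp only [pvStepB, hmatched, hget]
  by_cases hM : pvM wft s = []
  · simp [hM]
  · simp [hM]

-- the two outer folds agree (B's (scores, counts) projection equals A's state)
theorem pvFoldEq (wft : List (String × Int)) (sentences : List String)
    (per : PySem.Dict String (Int × Int)) (scores counts : PySem.Dict String Int)
    (hper : pvPerInv wft per)
    (hsc : ∀ s, scores.contains s = true → pvM wft s ≠ []) :
    sentences.foldl
      (fun (p : PySem.Dict String Int × PySem.Dict String Int) sentence =>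
        let r := wft.foldl (pvStepA sentence) (0, p.2, p.1)
        let scores' := r.2.2
        let scores' := if scores'.contains sentence then scores'.insert sentence (scores'.getD sentence 0) else scores'
        (scores', r.2.1)) (scores, counts) =
    (sentences.foldl (pvStepB wft) (per, scores, counts)).2 := by
  induction sentences generalizing per scores counts with
  | nil => rfl
  | cons s rest ih =>
    obtain ⟨hB, hinv'⟩ := pvOuterB wft s per scores counts hper
    have hA := pvOuterA wft s counts scores (hsc s)
    simp only [List.foldl_cons]
    have hBstate : pvStepB wft (per, scores, counts) s =
        ((pvStepB wft (per, scores, counts) s).1,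
         (if pvM wft s = [] then scores else scores.insert s (scores.getD s 0 + (pvM wft s).sum)),
         (if pvM wft s = [] then counts else counts.insert s ((pvM wft s).length : Int))) := by
      rw [← hB]
    rw [hBstate]
    have hsc' : ∀ t,
        (if pvM wft s = [] then scores else scores.insert s (scores.getD s 0 + (pvM wft s).sum)).contains t = true →
        pvM wft t ≠ [] := by
      intro t ht
      by_cases hM : pvM wft s = []
      · exact hsc t (by simpa [hM] using ht)
      · rw [if_neg hM, PySem.Dict.contains_insert] at ht
        rcases Bool.or_eq_true_iff.mp ht with h | h
        · have : t = s := by simpa using h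
          simpa [this] using hM
        · exact hsc t h
    rw [← ih _ _ _ (hBstate ▸ hinv') hsc']
    simp only [hA]

-- ===== VERDICT (by name: the statement is the Claim_ definition above) =====
theorem gen_sentence_score_and_wrd_cnt_tables_py_spec : Claim_equal_gen_sentence_score_and_wrd_cnt_tables_py := by
  intro sentences word_freq_table _hdom
  unfold Spec_gen_sentence_score_and_wrd_cnt_tables_py
  unfold gen_sentence_score_and_wrd_cnt_tables_py gen_sentence_score_and_wrd_cnt_tables_py_alt
  have h := pvFoldEq ((PySem.Dict.ofList word_freq_table).items) sentences
      PySem.Dict.empty PySem.Dict.empty PySem.Dict.empty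
      (by intro s v hv; simp [PySem.Dict.get?_empty] at hv)
      (by intro s hs; simp [PySem.Dict.contains_empty] at hs)
  simp only [h]
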